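-- pv_equiv track=rewrite | github.com/wkwunju/reduce | backend/app/services/llm_service.py | _extract_headline_and_summary
-- ===== SOURCE A (Python) =====
-- from typing import List, Dict, Optional, Tuple
--
-- def _extract_headline_and_summary(text: str) -> Tuple[Optional[str], str]:
--     if not text:
--         return None, ""
--     headline = None
--     summary_lines = []
--     lines = text.splitlines()
--     i = 0
--     while i < len(lines):
--         line = lines[i].strip()
--         if line.lower().startswith("headline:"):
--             headline = line.split(":", 1)[1].strip()
--         elif line.lower().startswith("summary:"):
--             remainder = line.split(":", 1)[1].strip()
--             if remainder:
--                 summary_lines.append(remainder)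
--             summary_lines.extend(lines[i + 1 :])
--             break
--         i += 1
--     if not summary_lines:
--         return headline, text.strip()
--     return headline, "\n".join(summary_lines).strip()
-- ===== SOURCE B (Python) =====
-- def _extract_headline_and_summary(text):
--     if not text:
--         return None, ""
--     lines = text.splitlines()
--     summary_idx = next((i for i, ln in enumerate(lines)
--                         if ln.strip().lower().startswith("summary:")), None)
--     region = lines if summary_idx is None else lines[:summary_idx]
--     headline = None
--     for ln in reversed(region):
--         s = ln.strip()
--         if s.lower().startswith("headline:"):
--             headline = s.split(":", 1)[1].strip()
--             break
--     if summary_idx is None: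
--         summary_lines = []
--     else:
--         rem = lines[summary_idx].strip().split(":", 1)[1].strip()
--         summary_lines = ([rem] if rem else []) + lines[summary_idx + 1:]
--     if not summary_lines:
--         return headline, text.strip()
--     return headline, "\n".join(summary_lines).strip()
-- ===== Notes on version B (the rewrite author's own statement) =====
-- stated objective: alternative
-- what changed: Replaces A's single stateful while-loop with break by two independent passes: first locate the first 'summary:' marker line, then scan the region before it in reverse for the last 'headline:' line, and assemble the summary tail directly from the marker index.
import Mathlib
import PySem

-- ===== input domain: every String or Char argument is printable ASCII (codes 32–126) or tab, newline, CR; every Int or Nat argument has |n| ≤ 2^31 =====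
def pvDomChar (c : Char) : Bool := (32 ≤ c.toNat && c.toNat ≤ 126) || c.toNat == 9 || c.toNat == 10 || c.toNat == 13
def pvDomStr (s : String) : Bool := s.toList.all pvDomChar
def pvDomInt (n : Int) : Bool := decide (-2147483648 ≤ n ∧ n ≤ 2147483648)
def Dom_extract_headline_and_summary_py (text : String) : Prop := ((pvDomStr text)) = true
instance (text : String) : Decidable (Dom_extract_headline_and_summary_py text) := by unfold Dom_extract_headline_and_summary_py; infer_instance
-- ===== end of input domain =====

-- B changes the decomposition: two independent passes (find the summary marker, then
-- reverse-scan the region before it for the last headline) instead of A's single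
-- stateful while-loop with break; same cost, no speed claim.

-- ===== PORT A =====
-- line.lower().startswith("headline:") on an already-stripped line
def pvIsHeadline (l : String) : Bool := PySem.Str.startswith (PySem.Str.lower l) "headline:"
-- line.lower().startswith("summary:") on an already-stripped line
def pvIsSummary (l : String) : Bool := PySem.Str.startswith (PySem.Str.lower l) "summary:"
-- line.split(":", 1)[1].strip(); the fallback "" is unreachable at every call site
-- (the line starts with "headline:"/"summary:" so ':' occurs and the split has 2 parts)
def pvAfterColon (l : String) : String :=
  match PySem.Str.splitMax? l ":" 1 with
  | some (_ :: r :: _) => PySem.Str.strip r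
  | _ => ""

-- A's while-loop over the remaining lines, carrying the current headline;
-- the summary branch returns summary_lines built from the remainder and the tail (the break)
def pvLoopA : List String → Option String → Option String × List String
  | [], h => (h, [])
  | l :: rest, h =>
    let s := PySem.Str.strip l
    if pvIsHeadline s then
      pvLoopA rest (some (pvAfterColon s))
    else if pvIsSummary s then
      let rem := pvAfterColon s
      (h, (if rem ≠ "" then [rem] else []) ++ rest)
    else
      pvLoopA rest h

def extract_headline_and_summary_py (text : String) : Option String × String :=
  if text = "" then (none, "")
  else
    let lines := PySem.Str.splitlines text
    let r := pvLoopA lines none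
    if r.2 = [] then (r.1, PySem.Str.strip text)
    else (r.1, PySem.Str.strip (PySem.Str.join "\n" r.2))

-- ===== PORT B =====
-- B's reverse for-loop with break: first headline in the reversed region
def pvFindHeadlineRev : List String → Option String
  | [] => none
  | l :: rest =>
    let s := PySem.Str.strip l
    if pvIsHeadline s then some (pvAfterColon s) else pvFindHeadlineRev rest

def extract_headline_and_summary_py_alt (text : String) : Option String × String :=
  if text = "" then (none, "")
  else
    let lines := PySem.Str.splitlines text
    let sidx := lines.findIdx? (fun l => pvIsSummary (PySem.Str.strip l))
    let region := match sidx with | none => lines | some i => lines.take i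
    let headline := pvFindHeadlineRev region.reverse
    let summary_lines : List String :=
      match sidx with
      | none => []
      | some i =>
        let rem := pvAfterColon (PySem.Str.strip (lines.getD i ""))
        (if rem ≠ "" then [rem] else []) ++ lines.drop (i + 1)
    if summary_lines = [] then (headline, PySem.Str.strip text)
    else (headline, PySem.Str.strip (PySem.Str.join "\n" summary_lines))

-- ===== PRECONDITION & SPEC =====
def Spec_extract_headline_and_summary_py (text : String) (out : Option String × String) : Prop := out = extract_headline_and_summary_py_alt text
instance (text : String) (out : Option String × String) : Decidable (Spec_extract_headline_and_summary_py text out) := by unfold Spec_extract_headline_and_summary_py; infer_instance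

-- ===== CLAIM (what is proved, stated in full; the proofs are below) =====
def Claim_equal_extract_headline_and_summary_py : Prop := ∀ (text : String), Dom_extract_headline_and_summary_py text → Spec_extract_headline_and_summary_py text (extract_headline_and_summary_py text)

-- ===== LEMMAS AND PROOFS =====

-- the reverse scan seeded with a previous headline h (proof-side generalisation of B's scan)
def pvH (rs : List String) (h : Option String) : Option String :=
  match pvFindHeadlineRev rs with
  | some v => some v
  | none => h

theorem pvH_nil (h : Option String) : pvH [] h = h := rfl

theorem pvH_none (rs : List String) : pvH rs none = pvFindHeadlineRev rs := by
  unfold pvH; cases pvFindHeadlineRev rs <;> rfl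

theorem pvFindHeadlineRev_append_singleton (rs : List String) (l : String) :
    pvFindHeadlineRev (rs ++ [l]) =
      match pvFindHeadlineRev rs with
      | some v => some v
      | none => if pvIsHeadline (PySem.Str.strip l) then some (pvAfterColon (PySem.Str.strip l)) else none := by
  induction rs with
  | nil => simp [pvFindHeadlineRev]
  | cons x xs ih =>
    simp only [List.cons_append, pvFindHeadlineRev, ih]
    by_cases hx : pvIsHeadline (PySem.Str.strip x) <;> simp [hx]

theorem pvH_append_singleton (rs : List String) (l : String) (h : Option String) :
    pvH (rs ++ [l]) h =
      pvH rs (if pvIsHeadline (PySem.Str.strip l) then some (pvAfterColon (PySem.Str.strip l)) else h) := by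
  unfold pvH
  rw [pvFindHeadlineRev_append_singleton]
  cases pvFindHeadlineRev rs <;> by_cases hl : pvIsHeadline (PySem.Str.strip l) <;> simp [hl]

-- a line cannot start with both "headline:" and "summary:"
theorem not_summary_of_headline (s : String) (hh : pvIsHeadline s = true) :
    pvIsSummary s = false := by
  unfold pvIsHeadline pvIsSummary at *
  by_contra hc
  rw [Bool.not_eq_false] at hc
  rw [PySem.Str.startswith_eq, PySem.Chars.startswith_iff] at hh hc
  obtain ⟨t1, e1⟩ := hh
  obtain ⟨t2, e2⟩ := hc
  rw [← e1] at e2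
  simp [show ("headline:").toList = ['h','e','a','d','l','i','n','e',':'] from rfl,
        show ("summary:").toList = ['s','u','m','m','a','r','y',':'] from rfl] at e2

-- the heart of the file: A's loop equals B's two-pass decomposition, for any line list
theorem pvLoopA_eq (ls : List String) (h : Option String) :
    pvLoopA ls h =
      match ls.findIdx? (fun l => pvIsSummary (PySem.Str.strip l)) with
      | none => (pvH ls.reverse h, [])
      | some i =>
        (pvH (ls.take i).reverse h,
         (if pvAfterColon (PySem.Str.strip (ls.getD i "")) ≠ "" then
            [pvAfterColon (PySem.Str.strip (ls.getD i ""))] else []) ++ ls.drop (i + 1)) := by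
  induction ls generalizing h with
  | nil => rfl
  | cons l rest ih =>
    rw [List.findIdx?_cons]
    by_cases hH : pvIsHeadline (PySem.Str.strip l) = true
    · have hS : pvIsSummary (PySem.Str.strip l) = false :=
        not_summary_of_headline _ hH
      simp only [pvLoopA, hH, hS, if_true, Bool.false_eq_true, if_false]
      rw [ih]
      cases hfi : rest.findIdx? (fun l => pvIsSummary (PySem.Str.strip l)) with
      | none => simp [pvH_append_singleton, hH]
      | some j => simp [List.take_succ_cons, pvH_append_singleton, hH, List.getD]
    · rw [Bool.not_eq_true] at hH
      by_cases hS : pvIsSummary (PySem.Str.strip l) = true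
      · simp [pvLoopA, hH, hS, pvH_nil, List.getD]
      · rw [Bool.not_eq_true] at hS
        simp only [pvLoopA, hH, hS, Bool.false_eq_true, if_false]
        rw [ih]
        cases hfi : rest.findIdx? (fun l => pvIsSummary (PySem.Str.strip l)) with
        | none => simp [pvH_append_singleton, hH]
        | some j => simp [List.take_succ_cons, pvH_append_singleton, hH, List.getD]

-- ===== VERDICT (by name: the statement is the Claim_ definition above) =====
theorem extract_headline_and_summary_py_spec : Claim_equal_extract_headline_and_summary_py := by
  intro text _
  unfold Spec_extract_headline_and_summary_py
  unfold extract_headline_and_summary_py extract_headline_and_summary_py_alt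
  by_cases ht : text = ""
  · simp [ht]
  · simp only [ht, if_false]
    rw [pvLoopA_eq]
    cases hfi : (PySem.Str.splitlines text).findIdx? (fun l => pvIsSummary (PySem.Str.strip l)) with
    | none => simp [pvH_none]
    | some i => simp [pvH_none]
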